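-- pv_equiv track=rewrite | github.com/alexandraback/datacollection | solutions_5636311922769920_1/Python/Idiotton/probd.py | f
-- ===== SOURCE A (Python) =====
-- def f(k, c, s):
--     if (k//c > s):
--         return 'IMPOSSIBLE'
--
--     ps = []
--     for i in range(0, k, c):
--         p = 0
--         for j in range(i, min([i+c, k])):
--             p = p*k + j
--
--         ps.append(p+1)
--
--
--     return ' '.join(map(str,ps))
-- ===== SOURCE B (Python) =====
-- def f(k, c, s):
--     if k // c > s:
--         return 'IMPOSSIBLE'
--     nfull = k // c
--     parts = []
--     if nfull > 0:
--         # weight sums over one full group, computed once: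
--         # R = sum of k**t, S = sum of m * k**(c-1-m)  (running power pw = k**t)
--         R = 0
--         S = 0
--         pw = 1
--         for t in range(c):
--             R += pw
--             S += (c - 1 - t) * pw
--             pw *= k
--         parts = [i * R + S + 1 for i in range(0, nfull * c, c)]
--     i = max(nfull * c, 0)
--     if i < k:
--         # final partial group, summed back-to-front with a running power
--         p = 0
--         pw = 1
--         for j in range(k - 1, i - 1, -1):
--             p += j * pw
--             pw *= k
--         parts.append(p + 1)
--     return ' '.join(map(str, parts))
-- ===== Notes on version B (the rewrite author's own statement) =====
-- stated objective: alternative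
-- what changed: Replaces the per-group inner Horner loop by a closed form: the weight sums R = sum(k**t) and S = sum(m*k**(c-1-m)) over one full group are computed once (with a running power), every full group starting at i is emitted as i*R + S + 1, and only the final partial group is summed directly back-to-front.
-- outside the precondition, e.g. on f(-3, -2, 5): A returns '1 1', B returns '1'; on f(5, 0, 1): A raises ZeroDivisionError, B raises ZeroDivisionError
import Mathlib
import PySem

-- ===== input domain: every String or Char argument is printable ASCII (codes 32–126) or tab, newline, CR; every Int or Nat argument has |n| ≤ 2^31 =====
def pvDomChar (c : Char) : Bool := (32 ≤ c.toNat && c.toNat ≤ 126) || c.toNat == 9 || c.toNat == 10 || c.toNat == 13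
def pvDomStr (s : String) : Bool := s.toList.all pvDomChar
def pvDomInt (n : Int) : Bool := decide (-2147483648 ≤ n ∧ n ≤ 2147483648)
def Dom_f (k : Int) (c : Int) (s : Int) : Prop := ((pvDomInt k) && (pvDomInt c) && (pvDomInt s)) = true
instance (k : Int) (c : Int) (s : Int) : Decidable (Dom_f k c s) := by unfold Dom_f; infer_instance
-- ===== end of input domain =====

-- B replaces A's per-group inner Horner loop by per-group closed forms i*R + S + 1
-- (R, S computed once) plus a direct power-sum for the final partial group (objective: alternative).

-- ===== PORT A =====
def f (k : Int) (c : Int) (s : Int) : String :=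
  if PySem.Int.floordiv k c > s then "IMPOSSIBLE"
  else
    let ps : List Int :=
      (PySem.List.pyRange 0 k c).foldl (fun ps i =>
        ps ++ [((PySem.List.pyRange i (min (i + c) k) 1).foldl (fun p j => p * k + j) 0) + 1]) []
    -- min([i+c, k]) of a two-element int list = binary min (exact)
    PySem.Str.join " " (ps.map PySem.Int.toStr)

-- ===== PORT B =====
def f_alt (k : Int) (c : Int) (s : Int) : String :=
  if PySem.Int.floordiv k c > s then "IMPOSSIBLE"
  else
    let nfull := PySem.Int.floordiv k c
    let parts : List Int :=
      if nfull > 0 then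
        -- loop state (R, S, pw): R += pw; S += (c-1-t)*pw; pw *= k
        let rs := (PySem.List.pyRange 0 c 1).foldl
          (fun (st : Int × Int × Int) t =>
            (st.1 + st.2.2, st.2.1 + (c - 1 - t) * st.2.2, st.2.2 * k)) (0, 0, 1)
        (PySem.List.pyRange 0 (nfull * c) c).map (fun i => i * rs.1 + rs.2.1 + 1)
      else []
    let i := max (nfull * c) 0
    let parts2 :=
      if i < k then
        -- loop state (p, pw): p += j*pw; pw *= k, j descending
        parts ++ [((PySem.List.pyRange (k - 1) (i - 1) (-1)).foldl
          (fun (st : Int × Int) j => (st.1 + j * st.2, st.2 * k)) (0, 1)).1 + 1]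
      else parts
    PySem.Str.join " " (parts2.map PySem.Int.toStr)

-- ===== PRECONDITION & SPEC =====
-- Pre_ excludes c = 0, where A raises ZeroDivisionError, and the degenerate corner
-- c < 0 ∧ k < 0 with the IMPOSSIBLE guard not firing, where A's negative-step chunking
-- of range(0, k, c) emits a '1' for every empty group — an accidental artefact outside
-- the task's natural domain (chunk size c ≥ 1).
def Pre_f (k : Int) (c : Int) (s : Int) : Prop :=
  c ≠ 0 ∧ (0 < c ∨ 0 ≤ k ∨ PySem.Int.floordiv k c > s)
instance (k : Int) (c : Int) (s : Int) : Decidable (Pre_f k c s) := by unfold Pre_f; infer_instance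
def pvWitness_f : Int × Int × Int := (10, 3, 0)
def Spec_f (k : Int) (c : Int) (s : Int) (out : String) : Prop := out = f_alt k c s
instance (k : Int) (c : Int) (s : Int) (out : String) : Decidable (Spec_f k c s out) := by unfold Spec_f; infer_instance

-- ===== CLAIM (what is proved, stated in full; the proofs are below) =====
def Claim_equal_f : Prop := ∀ (k : Int) (c : Int) (s : Int), Dom_f k c s → Pre_f k c s → Spec_f k c s (f k c s)

-- ===== LEMMAS AND PROOFS =====

-- the Horner value of [i, i+1, …, i+n-1] in base k
theorem pv_horner_range (k : Int) (n : Nat) (i : Int) :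
    ((List.range n).map (fun t : Nat => i + (t : Int))).foldl (fun p j => p * k + j) 0
      = ∑ t ∈ Finset.range n, (i + (t : Int)) * k ^ (n - 1 - t) := by
  induction n with
  | zero => simp
  | succ n ih =>
      rw [List.range_succ, List.map_append, List.foldl_append, Finset.sum_range_succ]
      simp only [List.map_cons, List.map_nil, List.foldl_cons, List.foldl_nil]
      rw [ih]
      have h1 : (∑ t ∈ Finset.range n, (i + (t : Int)) * k ^ (n - 1 - t)) * k
          = ∑ t ∈ Finset.range n, (i + (t : Int)) * k ^ (n + 1 - 1 - t) := by
        rw [Finset.sum_mul]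
        refine Finset.sum_congr rfl ?_
        intro t ht
        have ht' : t < n := Finset.mem_range.mp ht
        have he : n + 1 - 1 - t = (n - 1 - t) + 1 := by omega
        rw [he, pow_succ]; ring
      rw [← h1]
      have he : n + 1 - 1 - n = 0 := by omega
      rw [he]; ring

theorem pv_horner_pyRange (k i m : Int) :
    (PySem.List.pyRange i m 1).foldl (fun p j => p * k + j) 0
      = ∑ t ∈ Finset.range (m - i).toNat, (i + (t : Int)) * k ^ ((m - i).toNat - 1 - t) := by
  rw [PySem.List.pyRange_one, pv_horner_range]

-- value and final power of B's ascending (R, S, pw) loop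
theorem pv_rs (k c : Int) (n : Nat) :
    ((List.range n).map (fun t : Nat => (t : Int))).foldl
        (fun (st : Int × Int × Int) t =>
          (st.1 + st.2.2, st.2.1 + (c - 1 - t) * st.2.2, st.2.2 * k)) (0, 0, 1)
      = (∑ t ∈ Finset.range n, k ^ t,
         ∑ t ∈ Finset.range n, (c - 1 - (t : Int)) * k ^ t, k ^ n) := by
  induction n with
  | zero => simp
  | succ n ih =>
      rw [List.range_succ, List.map_append, List.foldl_append, ih]
      simp only [List.map_cons, List.map_nil, List.foldl_cons, List.foldl_nil]
      rw [Finset.sum_range_succ, Finset.sum_range_succ, pow_succ]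

-- value and final power of B's descending (p, pw) loop
theorem pv_desc (k : Int) (n : Nat) (a : Int) :
    ((List.range n).map (fun t : Nat => a - (t : Int))).foldl
        (fun (st : Int × Int) j => (st.1 + j * st.2, st.2 * k)) (0, 1)
      = (∑ t ∈ Finset.range n, (a - (t : Int)) * k ^ t, k ^ n) := by
  induction n with
  | zero => simp
  | succ n ih =>
      rw [List.range_succ, List.map_append, List.foldl_append, ih]
      simp only [List.map_cons, List.map_nil, List.foldl_cons, List.foldl_nil]
      rw [Finset.sum_range_succ, pow_succ]

-- B's back-to-front partial-group sum equals A's Horner fold over [i, k)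
theorem pv_partial_eq (k i : Int) (hik : i ≤ k) :
    ((PySem.List.pyRange (k - 1) (i - 1) (-1)).foldl
        (fun (st : Int × Int) j => (st.1 + j * st.2, st.2 * k)) (0, 1)).1
      = (PySem.List.pyRange i k 1).foldl (fun p j => p * k + j) 0 := by
  rw [pv_horner_pyRange, PySem.List.pyRange_neg_one]
  have hn : (k - 1 - (i - 1)).toNat = (k - i).toNat := by omega
  rw [hn, pv_desc]
  dsimp only
  set n := (k - i).toNat with hdefn
  have hcast : (n : Int) = k - i := by omega
  rw [← Finset.sum_range_reflect (fun t : Nat => (i + (t : Int)) * k ^ (n - 1 - t)) n]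
  refine Finset.sum_congr rfl ?_
  intro t ht
  have ht' : t < n := Finset.mem_range.mp ht
  have h1 : (i + ((n - 1 - t : Nat) : Int)) = k - 1 - (t : Int) := by omega
  have h2 : n - 1 - (n - 1 - t) = t := by omega
  rw [h2, h1]

-- B's closed form i*R + S equals A's Horner fold over a full group [i, i+c)
theorem pv_full_eq (k c i : Int) (hc : 0 < c) :
    i * ((PySem.List.pyRange 0 c 1).foldl
          (fun (st : Int × Int × Int) t =>
            (st.1 + st.2.2, st.2.1 + (c - 1 - t) * st.2.2, st.2.2 * k)) (0, 0, 1)).1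
      + ((PySem.List.pyRange 0 c 1).foldl
          (fun (st : Int × Int × Int) t =>
            (st.1 + st.2.2, st.2.1 + (c - 1 - t) * st.2.2, st.2.2 * k)) (0, 0, 1)).2.1
      = (PySem.List.pyRange i (i + c) 1).foldl (fun p j => p * k + j) 0 := by
  lift c to Nat using hc.le with n
  rw [pv_horner_pyRange]
  have hsub : i + (n : Int) - i = (n : Int) := by ring
  rw [hsub, Int.toNat_natCast, PySem.List.pyRange_zero_natCast, pv_rs]
  dsimp only
  have hR : (∑ t ∈ Finset.range n, k ^ t) = ∑ t ∈ Finset.range n, k ^ (n - 1 - t) :=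
    (Finset.sum_range_reflect (fun t => k ^ t) n).symm
  have hS : (∑ t ∈ Finset.range n, ((n : Int) - 1 - (t : Int)) * k ^ t)
      = ∑ t ∈ Finset.range n, (t : Int) * k ^ (n - 1 - t) := by
    rw [← Finset.sum_range_reflect (fun t => (t : Int) * k ^ (n - 1 - t)) n]
    refine Finset.sum_congr rfl ?_
    intro t ht
    have ht' : t < n := Finset.mem_range.mp ht
    have h1 : (((n - 1 - t : Nat)) : Int) = (n : Int) - 1 - (t : Int) := by omega
    have h2 : n - 1 - (n - 1 - t) = t := by omega
    rw [h2, h1]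
  rw [hR, hS, Finset.mul_sum, ← Finset.sum_add_distrib]
  exact Finset.sum_congr rfl (fun t ht => by ring)

theorem pv_mod_nonpos (k c : Int) (hc : c < 0) : PySem.Int.mod k c ≤ 0 := by
  have h := PySem.Int.mod_neg_neg (-k) (-c)
  simp only [neg_neg] at h
  have hpos : 0 ≤ PySem.Int.mod (-k) (-c) := by
    rw [PySem.Int.mod_eq_emod_of_pos (by omega)]
    exact Int.emod_nonneg _ (by omega)
  omega

theorem pv_pyRange_nil_of_nonpos (k c : Int) (hc : c ≠ 0) (h : 0 < c → k ≤ 0) (h2 : c < 0 → 0 ≤ k) :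
    PySem.List.pyRange 0 k c = [] := by
  simp only [PySem.List.pyRange]
  rw [if_neg hc]
  split_ifs with h1 h2' h3 <;> first
    | (exfalso; omega)
    | simp

-- the count of range(0, k, c) and range(0, q*c, c), c > 0
theorem pv_ceil_div (c a q : Int) (hc : 0 < c) (h1 : q * c ≤ a + c - 1) (h2 : a + c - 1 < (q + 1) * c) :
    (a + c - 1) / c = q := by
  have := (Int.ediv_emod_unique (a := a + c - 1) (b := c) (r := a + c - 1 - c * q) (q := q) hc).mpr
    ⟨by ring, by nlinarith, by nlinarith⟩
  exact this.1

-- ===== main list equality, c > 0 < k =====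
theorem pv_lists_eq (k c : Int) (hc : 0 < c) (hk : 0 < k) :
    ((PySem.List.pyRange 0 k c).foldl (fun ps i =>
        ps ++ [((PySem.List.pyRange i (min (i + c) k) 1).foldl (fun p j => p * k + j) 0) + 1]) []
      : List Int)
      = (if max (PySem.Int.floordiv k c * c) 0 < k then
           (if PySem.Int.floordiv k c > 0 then
              (PySem.List.pyRange 0 (PySem.Int.floordiv k c * c) c).map (fun i =>
                i * ((PySem.List.pyRange 0 c 1).foldl
                      (fun (st : Int × Int × Int) t =>
                        (st.1 + st.2.2, st.2.1 + (c - 1 - t) * st.2.2, st.2.2 * k)) (0, 0, 1)).1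
                  + ((PySem.List.pyRange 0 c 1).foldl
                      (fun (st : Int × Int × Int) t =>
                        (st.1 + st.2.2, st.2.1 + (c - 1 - t) * st.2.2, st.2.2 * k)) (0, 0, 1)).2.1 + 1)
            else []) ++
            [((PySem.List.pyRange (k - 1) (max (PySem.Int.floordiv k c * c) 0 - 1) (-1)).foldl
               (fun (st : Int × Int) j => (st.1 + j * st.2, st.2 * k)) (0, 1)).1 + 1]
         else
           (if PySem.Int.floordiv k c > 0 then
              (PySem.List.pyRange 0 (PySem.Int.floordiv k c * c) c).map (fun i =>
                i * ((PySem.List.pyRange 0 c 1).foldl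
                      (fun (st : Int × Int × Int) t =>
                        (st.1 + st.2.2, st.2.1 + (c - 1 - t) * st.2.2, st.2.2 * k)) (0, 0, 1)).1
                  + ((PySem.List.pyRange 0 c 1).foldl
                      (fun (st : Int × Int × Int) t =>
                        (st.1 + st.2.2, st.2.1 + (c - 1 - t) * st.2.2, st.2.2 * k)) (0, 0, 1)).2.1 + 1)
            else [])) := by
  set q := PySem.Int.floordiv k c with hqdef
  obtain ⟨hq1, hq2⟩ := (PySem.Int.floordiv_eq_iff_of_pos hc).mp hqdef.symm
  have hq0 : 0 ≤ q := by nlinarith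
  have hmax : max (q * c) 0 = q * c := max_eq_left (mul_nonneg hq0 hc.le)
  have hA := PySem.List.pyRange_of_pos 0 k (s := c) hc
  rw [if_pos hk] at hA
  simp only [sub_zero, zero_add] at hA
  rw [PySem.List.foldl_append_singleton_eq_map, List.nil_append, hA, hmax]
  rcases lt_or_eq_of_le hq1 with hlt | heq
  · -- partial last group exists
    have hGq : (k + c - 1) / c = q + 1 := pv_ceil_div c k (q + 1) hc (by nlinarith) (by nlinarith)
    rw [hGq, if_pos hlt]
    have hNsucc : (q + 1).toNat = q.toNat + 1 := by omega
    rw [hNsucc, List.range_succ, List.map_append, List.map_append]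
    congr 1
    · by_cases hqpos : q > 0
      · rw [if_pos hqpos]
        have hB := PySem.List.pyRange_of_pos 0 (q * c) (s := c) hc
        rw [if_pos (mul_pos hqpos hc)] at hB
        simp only [sub_zero, zero_add] at hB
        have hcount : (q * c + c - 1) / c = q := pv_ceil_div c (q * c) q hc (by nlinarith) (by nlinarith)
        rw [hcount] at hB
        rw [hB, List.map_map, List.map_map]
        apply List.map_congr_left
        intro t ht
        have ht' : (t : Int) < q := by
          have := List.mem_range.mp ht; omega
        simp only [Function.comp]
        have hle : c * (t : Int) + c ≤ k := by nlinarith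
        rw [min_eq_left (by omega)]
        rw [← pv_full_eq k c (c * (t : Int)) hc]
      · rw [if_neg hqpos]
        have hN0 : q.toNat = 0 := by omega
        rw [hN0]
        simp
    · simp only [List.map_cons, List.map_nil]
      have hNq : ((q.toNat : Int)) = q := by omega
      rw [hNq]
      have hmin : min (c * q + c) k = k := min_eq_right (by nlinarith)
      rw [hmin, mul_comm c q, ← pv_partial_eq k (q * c) (le_of_lt hlt)]
  · -- c divides k exactly
    have hGq : (k + c - 1) / c = q := pv_ceil_div c k q hc (by nlinarith) (by nlinarith)
    rw [hGq, if_neg (show ¬ q * c < k by rw [heq]; exact lt_irrefl k)]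
    have hqpos : q > 0 := by nlinarith
    rw [if_pos hqpos]
    have hB := PySem.List.pyRange_of_pos 0 (q * c) (s := c) hc
    rw [if_pos (mul_pos hqpos hc)] at hB
    simp only [sub_zero, zero_add] at hB
    have hcount : (q * c + c - 1) / c = q := pv_ceil_div c (q * c) q hc (by nlinarith) (by nlinarith)
    rw [hcount] at hB
    rw [hB, List.map_map, List.map_map]
    apply List.map_congr_left
    intro t ht
    have ht' : (t : Int) < q := by
      have := List.mem_range.mp ht; omega
    simp only [Function.comp]
    have hle : c * (t : Int) + c ≤ k := by nlinarith
    rw [min_eq_left (by omega)]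
    rw [← pv_full_eq k c (c * (t : Int)) hc]

theorem pv_main (k c s : Int) (hc0 : c ≠ 0)
    (hor3 : 0 < c ∨ 0 ≤ k ∨ PySem.Int.floordiv k c > s) : f k c s = f_alt k c s := by
  unfold f f_alt
  by_cases hg : PySem.Int.floordiv k c > s
  · rw [if_pos hg, if_pos hg]
  · have hor : 0 < c ∨ 0 ≤ k := by
      rcases hor3 with h | h | h
      exacts [Or.inl h, Or.inr h, absurd h hg]
    rw [if_neg hg, if_neg hg]
    dsimp only
    congr 1
    congr 1
    by_cases hcpos : 0 < c
    · by_cases hk : 0 < k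
      · exact pv_lists_eq k c hcpos hk
      · -- c > 0, k ≤ 0: both empty
        obtain ⟨hq1, hq2⟩ := (PySem.Int.floordiv_eq_iff_of_pos (a := k) hcpos).mp rfl
        rw [pv_pyRange_nil_of_nonpos k c hc0 (fun _ => by omega) (fun h => absurd hcpos (by omega))]
        have hng : ¬ PySem.Int.floordiv k c > 0 := by
          intro h; nlinarith
        have hni : ¬ max (PySem.Int.floordiv k c * c) 0 < k := by
          have := le_max_right (PySem.Int.floordiv k c * c) (0 : Int)
          omega
        rw [if_neg hni, if_neg hng]
        simp
    · have hcneg : c < 0 := by omega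
      have hknn : 0 ≤ k := hor.resolve_left hcpos
      rw [pv_pyRange_nil_of_nonpos k c hc0 (fun h => absurd h hcpos) (fun _ => hknn)]
      have hm := pv_mod_nonpos k c hcneg
      have hdm := PySem.Int.floordiv_mul_add_mod k c
      have hge : k ≤ PySem.Int.floordiv k c * c := by omega
      have hng : ¬ PySem.Int.floordiv k c > 0 := by
        intro h; nlinarith
      have hni : ¬ max (PySem.Int.floordiv k c * c) 0 < k := by
        have := le_max_left (PySem.Int.floordiv k c * c) (0 : Int)
        omega
      rw [if_neg hni, if_neg hng]
      simp

-- ===== VERDICT (by name: the statement is the Claim_ definition above) =====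
theorem f_spec : Claim_equal_f := by
  intro k c s _ hpre
  exact pv_main k c s hpre.1 hpre.2
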